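-- pv_equiv track=rewrite | github.com/sathish-kumar-manoharan/problem-solving | arrays/koko_eating_banana.py | minEatingSpeed1
-- ===== SOURCE A (Python) =====
-- import math
-- from typing import List
--
-- def minEatingSpeed1(piles: List[int], h: int) -> int:
--     #Start at an eating speed of 1.
--     speed = 1
--
--     while True:
--         hour_spent = 0
--
--         for pile in piles:
--             hour_spent += math.ceil(pile / speed)
--
--         # Check if Koko can finish all the piles within h hours,
--         # If so, return speed. Otherwise, let speed increment by
--         # 1 and repeat the previous iteration.
--         if hour_spent <= h:
--             return speed
--         else:
--             speed += 1
--
--     """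
--     Time: O(N * log(M))
--     Space: O(1)
--     """
--     def minEatingSpeed(self, piles: List[int], h: int) -> int:
--         left = 1
--         right = max(piles)
--
--         while left < right:
--             middle = (left + right) // 2
--             hour_spent = 0
--
--             for pile in piles:
--                 hour_spent += math.ceil(pile / middle)
--
--             # Check if middle is a workable speed, and cut the search space by half.
--             if hour_spent <= h:
--                 right = middle
--             else:
--                 left = middle + 1
--
--         # Once the left and right boundaries coincide, we find the target value,
--         # that is, the minimum workable eating speed.
--         return left
-- ===== SOURCE B (Python) =====
-- def minEatingSpeed1(piles, h):
--     # Scan speeds upward like the spec asks, but jump straight to the next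
--     # speed at which any pile's hour count ceil(pile/speed) can change
--     # (divisor blocks): only O(sqrt(|pile|)) distinct hour counts per pile,
--     # so only that many speeds are ever evaluated.
--     speed = 1
--     while True:
--         if sum(-(-p // speed) for p in piles) <= h:
--             return speed
--         # ceil(p/s) = (p-1)//s + 1 for p > 0 and -((-p)//s) for p <= 0, so a
--         # term can next change only at n // (n // speed) + 1 for its n.
--         steps = [n // (n // speed) + 1
--                  for n in ((p - 1 if p > 0 else -p) for p in piles)
--                  if n // speed > 0]
--         if not steps:
--             raise ValueError("no eating speed finishes the piles within h hours")
--         speed = min(steps)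
-- ===== Notes on version B (the rewrite author's own statement) =====
-- stated objective: alternative
-- what changed: Instead of testing every speed 1,2,3,... like A, B jumps straight to the next speed at which any pile's hour count ceil(pile/speed) can change (divisor blocks), evaluating only O(sqrt(max|pile|)) distinct speeds per pile; it uses exact integer ceiling division instead of float math.ceil, and raises ValueError exactly where A's scan would run forever (no feasible speed, outside Pre_).
import Mathlib
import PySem

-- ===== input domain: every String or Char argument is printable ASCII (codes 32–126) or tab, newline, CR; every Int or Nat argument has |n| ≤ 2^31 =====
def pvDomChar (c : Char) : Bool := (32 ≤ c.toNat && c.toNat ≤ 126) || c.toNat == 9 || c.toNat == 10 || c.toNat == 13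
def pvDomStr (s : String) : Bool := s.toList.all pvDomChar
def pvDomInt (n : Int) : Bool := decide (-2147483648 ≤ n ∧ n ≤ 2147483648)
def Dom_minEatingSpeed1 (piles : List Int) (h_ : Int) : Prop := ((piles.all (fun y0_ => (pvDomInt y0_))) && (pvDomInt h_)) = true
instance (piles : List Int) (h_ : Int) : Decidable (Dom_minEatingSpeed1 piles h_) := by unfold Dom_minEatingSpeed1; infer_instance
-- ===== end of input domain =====

-- B replaces A's speed-by-speed scan (one hour-sum per speed 1,2,3,…) by a
-- divisor-block jump scan that only evaluates the speeds at which some pile's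
-- hour count can change (objective: alternative).

-- ===== PORT A =====
-- math.ceil(pile / speed) is ported as exact integer ceiling -((-p) // s):
-- exact on the admitted domain (|pile| ≤ 2^31, speed ≥ 1), where IEEE double
-- division is precise enough that the float ceil equals the integer ceil.
def pvHoursA (piles : List Int) (speed : Int) : Int :=
  piles.foldl (fun acc p => acc + (-(PySem.Int.floordiv (-p) speed))) 0

-- A's `while True` loop; the fuel argument is only a totality guard (inside
-- Pre_ the loop returns before the fuel, max(piles, default 1), runs out).
def pvLoopA (piles : List Int) (h_ : Int) : Nat → Int → Int
  | 0, speed => speed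
  | n + 1, speed =>
    if pvHoursA piles speed ≤ h_ then speed else pvLoopA piles h_ n (speed + 1)

def minEatingSpeed1 (piles : List Int) (h_ : Int) : Int :=
  pvLoopA piles h_ (piles.foldl (fun a p => max a p) 1).toNat 1

-- ===== PORT B =====
def pvNOf (p : Int) : Int := if 0 < p then p - 1 else -p

def pvHoursB (piles : List Int) (s : Int) : Int :=
  (piles.map (fun p => -(PySem.Int.floordiv (-p) s))).sum

-- the candidate next speeds [n // (n // speed) + 1 for n in … if n // speed > 0]
def pvStepsB (piles : List Int) (s : Int) : List Int :=
  ((piles.map (fun p => pvNOf p)).filter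
      (fun n => decide (0 < PySem.Int.floordiv n s))).map
    (fun n => PySem.Int.floordiv n (PySem.Int.floordiv n s) + 1)

-- B's `while True` loop; fuel is only a totality guard (inside Pre_ the loop
-- returns first).  The `none` branch is Python's `raise ValueError` (only
-- reachable outside Pre_); its 0 stands for no returned value.
def pvLoopB (piles : List Int) (h_ : Int) : Nat → Int → Int
  | 0, speed => speed
  | k + 1, speed =>
    if pvHoursB piles speed ≤ h_ then speed
    else
      match PySem.List.min? (pvStepsB piles speed) (fun x => x) with
      | none => 0
      | some j => pvLoopB piles h_ k j

def minEatingSpeed1_alt (piles : List Int) (h_ : Int) : Int :=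
  pvLoopB piles h_ ((piles.foldl (fun a p => max a p.natAbs) 0) + 1) 1

-- ===== PRECONDITION & SPEC =====
-- integer ceiling ⌈p/s⌉ and the total hours at speed s (spec-level, not a port)
def pvCeil (p s : Int) : Int := -(PySem.Int.floordiv (-p) s)
def pvF (piles : List Int) (s : Int) : Int := (piles.map (fun p => pvCeil p s)).sum

-- integer square root by fuelled binary search (Nat.sqrt does not kernel-reduce)
def pvSqrtGo (n : Nat) : Nat → Nat → Nat → Nat
  | 0, lo, _hi => lo
  | f + 1, lo, hi =>
    if lo + 1 < hi then
      if ((lo + hi) / 2) * ((lo + hi) / 2) ≤ n then pvSqrtGo n f ((lo + hi) / 2) hi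
      else pvSqrtGo n f lo ((lo + hi) / 2)
    else lo

def pvSqrt (n : Nat) : Nat := pvSqrtGo n 64 0 (n + 1)

-- the divisor-block boundary speeds: the hour total pvF is constant between
-- consecutive boundaries, so a feasible speed exists iff a boundary one does
def pvCands (piles : List Int) : List Int :=
  1 :: piles.flatMap (fun p =>
    (List.range (pvSqrt (pvNOf p).toNat)).flatMap
      (fun k => [(k : Int) + 2, PySem.Int.floordiv (pvNOf p) ((k : Int) + 1) + 1]))

-- Pre_ says some eating speed finishes all the piles within h_ hours (stated
-- over the boundary speeds only, which is equivalent); it excludes exactly the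
-- inputs where no speed at all suffices: there A's scan never returns
-- (diverges) and B raises ValueError.
def Pre_minEatingSpeed1 (piles : List Int) (h_ : Int) : Prop :=
  ∃ s ∈ pvCands piles, pvF piles s ≤ h_
instance (piles : List Int) (h_ : Int) : Decidable (Pre_minEatingSpeed1 piles h_) := by
  unfold Pre_minEatingSpeed1; infer_instance

def pvWitness_minEatingSpeed1 : List Int × Int := ([3, 6, 7, 11], 8)

def Spec_minEatingSpeed1 (piles : List Int) (h_ : Int) (out : Int) : Prop := out = minEatingSpeed1_alt piles h_
instance (piles : List Int) (h_ : Int) (out : Int) : Decidable (Spec_minEatingSpeed1 piles h_ out) := by unfold Spec_minEatingSpeed1; infer_instance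

-- ===== CLAIM (what is proved, stated in full; the proofs are below) =====
def Claim_equal_minEatingSpeed1 : Prop := ∀ (piles : List Int) (h_ : Int), Dom_minEatingSpeed1 piles h_ → Pre_minEatingSpeed1 piles h_ → Spec_minEatingSpeed1 piles h_ (minEatingSpeed1 piles h_)

-- ===== LEMMAS AND PROOFS =====

theorem pvHoursA_eq (piles : List Int) (s : Int) : pvHoursA piles s = pvF piles s := by
  unfold pvHoursA pvF pvCeil
  rw [PySem.List.foldl_add]
  simp

theorem pvHoursB_eq (piles : List Int) (s : Int) : pvHoursB piles s = pvF piles s := rfl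

-- floordiv facts on a nonnegative dividend
theorem pvFd_nonneg (n s : Int) (hn : 0 ≤ n) (hs : 0 < s) : 0 ≤ PySem.Int.floordiv n s := by
  rw [PySem.Int.le_floordiv_iff_mul_le hs]; omega

theorem pvFd_bracket (n s : Int) (hs : 0 < s) :
    PySem.Int.floordiv n s * s ≤ n ∧ n < (PySem.Int.floordiv n s + 1) * s :=
  (PySem.Int.floordiv_eq_iff_of_pos hs).1 rfl

theorem pvFd_zero_of_lt (n s : Int) (_hn : 0 ≤ n) (hns : n < s) :
    PySem.Int.floordiv n s = 0 := by
  exact (PySem.Int.floordiv_eq_iff_of_pos (by omega)).2 (by constructor <;> nlinarith)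

-- the quotient is unchanged on a divisor block: s ≤ t ≤ n // (n // s)
theorem pvFd_block (n s t : Int) (_hn : 0 ≤ n) (hs : 0 < s) (hst : s ≤ t)
    (hq : 0 < PySem.Int.floordiv n s)
    (ht : t ≤ PySem.Int.floordiv n (PySem.Int.floordiv n s)) :
    PySem.Int.floordiv n t = PySem.Int.floordiv n s := by
  have hb := pvFd_bracket n s hs
  have htq : t * PySem.Int.floordiv n s ≤ n := by
    rw [PySem.Int.le_floordiv_iff_mul_le hq] at ht; exact ht
  exact (PySem.Int.floordiv_eq_iff_of_pos (by omega)).2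
    ⟨by nlinarith, by nlinarith [hb.2]⟩

-- the jump candidate n // (n // s) + 1 is strictly beyond s
theorem pvFd_step_gt (n s : Int) (_hn : 0 ≤ n) (hs : 0 < s)
    (hq : 0 < PySem.Int.floordiv n s) :
    s < PySem.Int.floordiv n (PySem.Int.floordiv n s) + 1 := by
  have hb := pvFd_bracket n s hs
  have : s ≤ PySem.Int.floordiv n (PySem.Int.floordiv n s) := by
    rw [PySem.Int.le_floordiv_iff_mul_le hq]; nlinarith [hb.1]
  omega

theorem pvNOf_nonneg (p : Int) : 0 ≤ pvNOf p := by
  unfold pvNOf; split_ifs <;> omega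

-- ⌈p/s⌉ written through pvNOf: a monotone transform of (pvNOf p) // s
theorem pvCeil_nOf (p s : Int) (hs : 0 < s) :
    pvCeil p s =
      if 0 < p then PySem.Int.floordiv (pvNOf p) s + 1
      else -(PySem.Int.floordiv (pvNOf p) s) := by
  unfold pvNOf
  by_cases hp : 0 < p
  · simp only [hp, if_true]
    have hb := pvFd_bracket (p - 1) s hs
    exact (PySem.Int.neg_floordiv_neg_eq_iff_of_pos
      (a := p) (b := s) (q := PySem.Int.floordiv (p - 1) s + 1) hs).2
      ⟨by nlinarith [hb.1], by nlinarith [hb.2]⟩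
  · simp only [hp, if_false]; rfl

theorem pvCeil_const (p s t : Int) (hs : 0 < s) (hst : s ≤ t)
    (hdiv : PySem.Int.floordiv (pvNOf p) t = PySem.Int.floordiv (pvNOf p) s) :
    pvCeil p t = pvCeil p s := by
  rw [pvCeil_nOf p t (by omega), pvCeil_nOf p s hs, hdiv]

theorem pvF_congr (piles : List Int) (s t : Int)
    (h : ∀ p ∈ piles, pvCeil p t = pvCeil p s) : pvF piles t = pvF piles s := by
  unfold pvF
  exact congrArg List.sum (List.map_congr_left h)

-- no pile can change its hour count any more: the sum is frozen above s
theorem pvF_frozen (piles : List Int) (s t : Int) (hs : 0 < s) (hst : s ≤ t)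
    (hall : ∀ p ∈ piles, ¬ 0 < PySem.Int.floordiv (pvNOf p) s) :
    pvF piles t = pvF piles s := by
  apply pvF_congr
  intro p hp
  have hn := pvNOf_nonneg p
  have h0 : PySem.Int.floordiv (pvNOf p) s = 0 := by
    have := pvFd_nonneg (pvNOf p) s hn hs
    have := hall p hp
    omega
  have hlt : pvNOf p < s := by
    by_contra hge
    have hb := pvFd_bracket (pvNOf p) s hs
    rw [h0] at hb
    omega
  apply pvCeil_const p s t hs hst
  rw [h0, pvFd_zero_of_lt (pvNOf p) t hn (by omega)]

-- the hour sum is constant between a speed and the minimum jump candidate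
theorem pvF_const_upto (piles : List Int) (s t j : Int) (hs : 0 < s)
    (hst : s ≤ t) (htj : t < j)
    (hmin : ∀ x ∈ pvStepsB piles s, j ≤ x) :
    pvF piles t = pvF piles s := by
  apply pvF_congr
  intro p hp
  have hn := pvNOf_nonneg p
  by_cases hq : 0 < PySem.Int.floordiv (pvNOf p) s
  · have hmem : PySem.Int.floordiv (pvNOf p) (PySem.Int.floordiv (pvNOf p) s) + 1
        ∈ pvStepsB piles s := by
      unfold pvStepsB
      apply List.mem_map.2
      refine ⟨pvNOf p, List.mem_filter.2 ⟨List.mem_map.2 ⟨p, hp, rfl⟩, by simpa using hq⟩, rfl⟩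
    have hj := hmin _ hmem
    exact pvCeil_const p s t hs hst
      (pvFd_block (pvNOf p) s t hn hs hst hq (by omega))
  · -- this pile's count is already frozen at s
    have h0 : PySem.Int.floordiv (pvNOf p) s = 0 := by
      have := pvFd_nonneg (pvNOf p) s hn hs
      omega
    have hlt : pvNOf p < s := by
      by_contra hge
      have hb := pvFd_bracket (pvNOf p) s hs
      rw [h0] at hb
      omega
    apply pvCeil_const p s t hs hst
    rw [h0, pvFd_zero_of_lt (pvNOf p) t hn (by omega)]

-- the characterisation both ports satisfy: the least speed ≥ 1 whose hour sum fits in h_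
def pvGood (piles : List Int) (h_ : Int) (n : Int) : Prop :=
  1 ≤ n ∧ pvF piles n ≤ h_ ∧ ∀ t, 1 ≤ t → t < n → h_ < pvF piles t

theorem pvGood_unique (piles : List Int) (h_ : Int) (a b : Int)
    (ha : pvGood piles h_ a) (hb : pvGood piles h_ b) : a = b := by
  rcases lt_trichotomy a b with h | h | h
  · exact absurd (hb.2.2 a ha.1 h) (by exact not_lt.2 ha.2.1)
  · exact h
  · exact absurd (ha.2.2 b hb.1 h) (by exact not_lt.2 hb.2.1)

theorem pvLoopA_good (piles : List Int) (h_ : Int) :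
    ∀ (fuel : Nat) (s : Int), 1 ≤ s →
    (∀ t, 1 ≤ t → t < s → h_ < pvF piles t) →
    (∃ n, s ≤ n ∧ n < s + (fuel : Int) ∧ pvF piles n ≤ h_) →
    pvGood piles h_ (pvLoopA piles h_ fuel s) := by
  intro fuel
  induction fuel with
  | zero => intro s _ _ ⟨n, h1, h2, _⟩; omega
  | succ k ih =>
    intro s hs hinv ⟨n, hn1, hn2, hn3⟩
    simp only [pvLoopA, pvHoursA_eq]
    by_cases hc : pvF piles s ≤ h_
    · simp only [hc, if_true]; exact ⟨hs, hc, hinv⟩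
    · simp only [hc, if_false]
      apply ih (s + 1) (by omega)
      · intro t ht1 ht2
        rcases lt_or_eq_of_le (by omega : t ≤ s) with h | h
        · exact hinv t ht1 h
        · rw [h]; omega
      · refine ⟨n, ?_, by push_cast at hn2 ⊢; omega, hn3⟩
        rcases lt_or_eq_of_le hn1 with h | h
        · omega
        · exfalso; rw [← h] at hn3; omega

theorem pvLoopB_good (piles : List Int) (h_ : Int) :
    ∀ (fuel : Nat) (s : Int), 1 ≤ s →
    (∀ t, 1 ≤ t → t < s → h_ < pvF piles t) →
    (∃ n, s ≤ n ∧ n < s + (fuel : Int) ∧ pvF piles n ≤ h_) →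
    pvGood piles h_ (pvLoopB piles h_ fuel s) := by
  intro fuel
  induction fuel with
  | zero => intro s _ _ ⟨n, h1, h2, _⟩; omega
  | succ k ih =>
    intro s hs hinv ⟨n, hn1, hn2, hn3⟩
    simp only [pvLoopB, pvHoursB_eq]
    by_cases hc : pvF piles s ≤ h_
    · simp only [hc, if_true]; exact ⟨hs, hc, hinv⟩
    · simp only [hc, if_false]
      rcases hm : PySem.List.min? (pvStepsB piles s) (fun x => x) with _ | j
      · -- no jump candidates: the sum is frozen > h_ for every later speed
        exfalso
        have hnil := (PySem.List.min?_eq_none_iff (pvStepsB piles s) (fun x => x)).1 hm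
        have hall : ∀ p ∈ piles, ¬ 0 < PySem.Int.floordiv (pvNOf p) s := by
          intro p hp hq
          have hmem : PySem.Int.floordiv (pvNOf p) (PySem.Int.floordiv (pvNOf p) s) + 1
              ∈ pvStepsB piles s := by
            unfold pvStepsB
            apply List.mem_map.2
            refine ⟨pvNOf p, List.mem_filter.2 ⟨List.mem_map.2 ⟨p, hp, rfl⟩, by simpa using hq⟩, rfl⟩
          rw [hnil] at hmem
          exact absurd hmem (List.not_mem_nil)
        have := pvF_frozen piles s n (by omega) hn1 hall
        omega
      · have hjmem := PySem.List.min?_mem hm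
        have hjmin : ∀ x ∈ pvStepsB piles s, j ≤ x := PySem.List.min?_isMin hm
        -- j comes from some pile, so s < j
        have hsj : s < j := by
          unfold pvStepsB at hjmem
          obtain ⟨m, hmf, hmj⟩ := List.mem_map.1 hjmem
          obtain ⟨hmm, hmc⟩ := List.mem_filter.1 hmf
          obtain ⟨p, _, hpn⟩ := List.mem_map.1 hmm
          subst hpn hmj
          exact pvFd_step_gt (pvNOf p) s (pvNOf_nonneg p) (by omega) (by simpa using hmc)
        have hconst : ∀ t, s ≤ t → t < j → pvF piles t = pvF piles s := by
          intro t h1 h2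
          exact pvF_const_upto piles s t j (by omega) h1 h2 hjmin
        apply ih j (by omega)
        · intro t ht1 ht2
          by_cases hcase : t < s
          · exact hinv t ht1 hcase
          · rw [hconst t (by omega) ht2]; omega
        · refine ⟨n, ?_, by omega, hn3⟩
          by_contra hlt
          rw [hconst n hn1 (by omega)] at hn3
          omega

-- foldl max is bounded by any common upper bound
theorem pvFoldlMax_le (l : List Int) :
    ∀ (a c : Int), a ≤ c → (∀ p ∈ l, p ≤ c) →
    l.foldl (fun x p => max x p) a ≤ c := by
  induction l with
  | nil => intro a c ha _; simpa using ha
  | cons q l ih =>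
    intro a c ha hl
    simp only [List.foldl_cons]
    exact ih _ c (by have := hl q (by simp); omega) (fun p hp => hl p (by simp [hp]))

-- every boundary speed is at least 1
theorem pvCands_one_le (piles : List Int) : ∀ s ∈ pvCands piles, 1 ≤ s := by
  intro s hs
  unfold pvCands at hs
  rcases List.mem_cons.1 hs with h | h
  · omega
  · obtain ⟨p, _, hm⟩ := List.mem_flatMap.1 h
    obtain ⟨k, hkr, hk⟩ := List.mem_flatMap.1 hm
    obtain ⟨a, -, rfl⟩ : ∃ a, a < pvSqrt (pvNOf p).toNat ∧ k = (a : Int) := by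
      simpa using hkr
    have hfd := pvFd_nonneg (pvNOf p) ((a : Int) + 1) (pvNOf_nonneg p) (by omega)
    simp only [List.mem_cons, List.not_mem_nil, or_false] at hk
    rcases hk with h' | h' <;> omega

-- floordiv of a nonnegative dividend is antitone in the divisor
theorem pvFd_anti (n s t : Int) (hn : 0 ≤ n) (hs : 0 < s) (hst : s ≤ t) :
    PySem.Int.floordiv n t ≤ PySem.Int.floordiv n s := by
  have hq := pvFd_nonneg n t hn (by omega)
  have hb := pvFd_bracket n t (by omega)
  rw [PySem.Int.le_floordiv_iff_mul_le hs]
  nlinarith [hb.1]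

theorem pvCeil_eq_one (p m : Int) (hp : 1 ≤ p) (hpm : p ≤ m) : pvCeil p m = 1 := by
  exact (PySem.Int.neg_floordiv_neg_eq_iff_of_pos (a := p) (b := m) (q := 1) (by omega)).2
    (by constructor <;> nlinarith)

-- the hour total is nondecreasing from max(piles, 1) onwards
theorem pvF_mono_max (piles : List Int) (s : Int)
    (hs : piles.foldl (fun a p => max a p) 1 ≤ s) :
    pvF piles (piles.foldl (fun a p => max a p) 1) ≤ pvF piles s := by
  have hmax := PySem.List.le_foldl_max piles 1
  set M := piles.foldl (fun a p => max a p) 1 with hM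
  unfold pvF
  apply List.sum_le_sum
  intro p hp
  by_cases hpos : 0 < p
  · rw [pvCeil_eq_one p M (by omega) (hmax.2 p hp),
      pvCeil_eq_one p s (by omega) (by have := hmax.2 p hp; omega)]
  · have := pvFd_anti (-p) M s (by omega) (by omega) hs
    unfold pvCeil
    omega

-- Pre_ hands each port a feasible speed below max(piles, 1), inside its fuel
theorem pvFeas_le_max (piles : List Int) (h_ : Int) (hpre : Pre_minEatingSpeed1 piles h_) :
    ∃ n, 1 ≤ n ∧ n ≤ piles.foldl (fun a p => max a p) 1 ∧ pvF piles n ≤ h_ := by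
  obtain ⟨s, hmem, hfeas⟩ := hpre
  have hs1 := pvCands_one_le piles s hmem
  set M := piles.foldl (fun a p => max a p) 1 with hM
  have hM1 : (1 : Int) ≤ M := (PySem.List.le_foldl_max piles 1).1
  by_cases h : s ≤ M
  · exact ⟨s, hs1, h, hfeas⟩
  · exact ⟨M, hM1, le_refl M, le_trans (pvF_mono_max piles s (by omega)) hfeas⟩

theorem pvA_good (piles : List Int) (h_ : Int) (hpre : Pre_minEatingSpeed1 piles h_) :
    pvGood piles h_ (minEatingSpeed1 piles h_) := by
  obtain ⟨n, hn1, hn2, hfeas⟩ := pvFeas_le_max piles h_ hpre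
  unfold minEatingSpeed1
  set M := piles.foldl (fun a p => max a p) 1 with hM
  apply pvLoopA_good piles h_ M.toNat 1 (by omega) (by intro t ht1 ht2; omega)
  exact ⟨n, by omega, by omega, hfeas⟩

theorem pvB_good (piles : List Int) (h_ : Int) (hpre : Pre_minEatingSpeed1 piles h_) :
    pvGood piles h_ (minEatingSpeed1_alt piles h_) := by
  obtain ⟨n, hn1, hn2, hfeas⟩ := pvFeas_le_max piles h_ hpre
  unfold minEatingSpeed1_alt
  have hmax := PySem.List.le_foldl_max_nat piles (fun p => p.natAbs) 0
  set Mn := piles.foldl (fun a p => max a p.natAbs) 0 with hMn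
  have hMle : piles.foldl (fun a p => max a p) 1 ≤ (Mn : Int) + 1 :=
    pvFoldlMax_le piles 1 ((Mn : Int) + 1) (by omega)
      (fun p hp => by have := hmax.2 p hp; omega)
  apply pvLoopB_good piles h_ (Mn + 1) 1 (by omega) (by intro t ht1 ht2; omega)
  exact ⟨n, by omega, by push_cast; omega, hfeas⟩

-- ===== VERDICT (by name: the statement is the Claim_ definition above) =====
theorem minEatingSpeed1_spec : Claim_equal_minEatingSpeed1 := by
  intro piles h_ _ hpre
  unfold Spec_minEatingSpeed1
  exact pvGood_unique piles h_ _ _ (pvA_good piles h_ hpre) (pvB_good piles h_ hpre)
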